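-- pv_equiv track=rewrite | github.com/patabrava/AIUGC | app/features/publish/handlers.py | _derive_publish_status
-- ===== SOURCE A (Python) =====
-- from typing import Any, Dict, List, Optional, Tuple
--
-- def _derive_publish_status(networks: List[str], publish_results: Dict[str, Any]) -> str:
--     """Collapse per-network publish results to the existing post-level publish status."""
--     if not networks:
--         return "pending"
--
--     statuses = [str((publish_results.get(network) or {}).get("status", "pending")) for network in networks]
--     if all(status == "published" for status in statuses):
--         return "published"
--     if any(status == "failed" for status in statuses):
--         return "failed"
--     if any(status in {"publishing", "processing", "awaiting_user_action"} for status in statuses):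
--         return "publishing"
--     if any(status == "scheduled" for status in statuses):
--         return "scheduled"
--     return "pending"
-- ===== SOURCE B (Python) =====
-- def _derive_publish_status(networks, publish_results):
--     """Collapse per-network publish results to one status, in a single pass."""
--     if not networks:
--         return "pending"
--     all_published = True
--     any_failed = False
--     any_publishing = False
--     any_scheduled = False
--     for network in networks:
--         status = str((publish_results.get(network) or {}).get("status", "pending"))
--         all_published = all_published and status == "published"
--         any_failed = any_failed or status == "failed"
--         any_publishing = any_publishing or status in {"publishing", "processing", "awaiting_user_action"}
--         any_scheduled = any_scheduled or status == "scheduled"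
--     if all_published:
--         return "published"
--     if any_failed:
--         return "failed"
--     if any_publishing:
--         return "publishing"
--     if any_scheduled:
--         return "scheduled"
--     return "pending"
-- ===== Notes on version B (the rewrite author's own statement) =====
-- stated objective: alternative
-- what changed: Replaces the intermediate status list plus four separate full scans (all/any x3) with a single loop over networks that accumulates four booleans, resolved once after the loop.
import Mathlib
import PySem

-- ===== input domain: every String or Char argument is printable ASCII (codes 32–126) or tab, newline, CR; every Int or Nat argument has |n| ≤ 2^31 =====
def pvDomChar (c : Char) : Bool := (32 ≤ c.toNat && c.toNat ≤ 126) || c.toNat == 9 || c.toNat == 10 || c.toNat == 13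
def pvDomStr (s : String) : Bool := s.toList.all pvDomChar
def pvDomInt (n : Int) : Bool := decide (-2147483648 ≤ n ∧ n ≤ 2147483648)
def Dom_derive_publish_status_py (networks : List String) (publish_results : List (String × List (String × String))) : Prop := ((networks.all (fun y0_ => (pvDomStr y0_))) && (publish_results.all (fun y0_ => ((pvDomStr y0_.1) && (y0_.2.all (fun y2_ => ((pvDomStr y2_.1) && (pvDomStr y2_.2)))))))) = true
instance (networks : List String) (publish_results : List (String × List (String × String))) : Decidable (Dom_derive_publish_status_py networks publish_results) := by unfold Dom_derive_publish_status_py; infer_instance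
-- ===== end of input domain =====

-- ===== PORT A =====
-- B differs from A only in loop structure (one accumulating pass vs list + four scans).
-- shared helper: str((publish_results.get(network) or {}).get("status", "pending"))
def pvStatusOf (publish_results : List (String × List (String × String))) (network : String) : String :=
  (((publish_results.lookup network).getD []).lookup "status").getD "pending"

def derive_publish_status_py (networks : List String) (publish_results : List (String × List (String × String))) : String :=
  if networks = [] then "pending"
  else
    let statuses := networks.map (pvStatusOf publish_results)
    if statuses.all (fun s => s == "published") then "published"
    else if statuses.any (fun s => s == "failed") then "failed"
    else if statuses.any (fun s => s == "publishing" || s == "processing" || s == "awaiting_user_action") then "publishing"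
    else if statuses.any (fun s => s == "scheduled") then "scheduled"
    else "pending"

-- ===== PORT B =====
def pvStep (publish_results : List (String × List (String × String)))
    (st : Bool × Bool × Bool × Bool) (network : String) : Bool × Bool × Bool × Bool :=
  let s := pvStatusOf publish_results network
  (st.1 && (s == "published"),
   st.2.1 || (s == "failed"),
   st.2.2.1 || (s == "publishing" || s == "processing" || s == "awaiting_user_action"),
   st.2.2.2 || (s == "scheduled"))

def derive_publish_status_py_alt (networks : List String) (publish_results : List (String × List (String × String))) : String :=
  if networks = [] then "pending"
  else
    let r := networks.foldl (pvStep publish_results) (true, false, false, false)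
    if r.1 then "published"
    else if r.2.1 then "failed"
    else if r.2.2.1 then "publishing"
    else if r.2.2.2 then "scheduled"
    else "pending"

-- ===== PRECONDITION & SPEC =====
def Spec_derive_publish_status_py (networks : List String) (publish_results : List (String × List (String × String))) (out : String) : Prop := out = derive_publish_status_py_alt networks publish_results
instance (networks : List String) (publish_results : List (String × List (String × String))) (out : String) : Decidable (Spec_derive_publish_status_py networks publish_results out) := by unfold Spec_derive_publish_status_py; infer_instance

-- ===== CLAIM (what is proved, stated in full; the proofs are below) =====
def Claim_equal_derive_publish_status_py : Prop := ∀ (networks : List String) (publish_results : List (String × List (String × String))), Dom_derive_publish_status_py networks publish_results → Spec_derive_publish_status_py networks publish_results (derive_publish_status_py networks publish_results)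

-- ===== LEMMAS AND PROOFS =====
theorem pvFold_eq (publish_results : List (String × List (String × String)))
    (ns : List String) (st : Bool × Bool × Bool × Bool) :
    ns.foldl (pvStep publish_results) st =
      (st.1 && ns.all (fun n => pvStatusOf publish_results n == "published"),
       st.2.1 || ns.any (fun n => pvStatusOf publish_results n == "failed"),
       st.2.2.1 || ns.any (fun n => pvStatusOf publish_results n == "publishing" || pvStatusOf publish_results n == "processing" || pvStatusOf publish_results n == "awaiting_user_action"),
       st.2.2.2 || ns.any (fun n => pvStatusOf publish_results n == "scheduled")) := by
  induction ns generalizing st with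
  | nil => simp
  | cons x xs ih =>
    simp only [List.foldl_cons, ih, List.all_cons, List.any_cons, pvStep,
      Bool.and_assoc, Bool.or_assoc]

-- ===== VERDICT (by name: the statement is the Claim_ definition above) =====
theorem derive_publish_status_py_spec : Claim_equal_derive_publish_status_py := by
  intro networks publish_results _
  unfold Spec_derive_publish_status_py derive_publish_status_py derive_publish_status_py_alt
  cases h : decide (networks = []) with
  | true => simp_all
  | false =>
    simp [pvFold_eq, List.all_map, List.any_map, Function.comp]
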